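-- pv_equiv track=rewrite | github.com/jkenjii/NLP | Tarefa 5/ler_text_HMM.py | EP
-- ===== SOURCE A (Python) =====
-- data_train = []
--
-- def EP(palavra, classe, train_tuple = data_train):
--     classes_list = []
--     #conta numero de vezes que a classe ocorreu no dataset de treinamento
--     for par in train_tuple:
--     	if par[1]==classe:
--     		classes_list.append(par)
--     count_classe = len(classes_list)
--     #conta numero de vezes que a palavra ocorreu com a classe dada
--     palavra_classe = []
--     for par in classes_list:
--     	if par[0]==palavra:
--     		palavra_classe.append(par[0])
--     count_palavra_classe = len(palavra_classe)
--
--     return (count_palavra_classe, count_classe)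
-- ===== SOURCE B (Python) =====
-- def EP(palavra, classe, train_tuple=None):
--     if train_tuple is None:
--         train_tuple = data_train
--     count_palavra_classe = 0
--     count_classe = 0
--     for par in train_tuple:
--         if par[1] == classe:
--             count_classe += 1
--             if par[0] == palavra:
--                 count_palavra_classe += 1
--     return (count_palavra_classe, count_classe)
--
-- data_train = []
-- ===== Notes on version B (the rewrite author's own statement) =====
-- stated objective: simpler
-- what changed: One pass with two integer counters replaces A's two sequential filter-into-list-then-len passes and its intermediate lists.
import Mathlib
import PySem

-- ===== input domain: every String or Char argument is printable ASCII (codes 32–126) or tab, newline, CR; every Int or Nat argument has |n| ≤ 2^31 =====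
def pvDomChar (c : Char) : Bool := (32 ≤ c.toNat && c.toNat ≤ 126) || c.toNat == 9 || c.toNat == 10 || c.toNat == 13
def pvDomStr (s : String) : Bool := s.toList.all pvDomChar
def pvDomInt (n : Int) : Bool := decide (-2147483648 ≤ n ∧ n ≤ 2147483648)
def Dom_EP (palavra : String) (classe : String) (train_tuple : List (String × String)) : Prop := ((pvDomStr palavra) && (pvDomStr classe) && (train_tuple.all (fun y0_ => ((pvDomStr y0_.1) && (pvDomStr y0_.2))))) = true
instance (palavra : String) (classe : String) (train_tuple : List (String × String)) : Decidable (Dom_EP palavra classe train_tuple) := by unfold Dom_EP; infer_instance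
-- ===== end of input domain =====

-- ===== PORT A =====
-- One honest line: B makes a single pass with two integer counters instead of A's two filter-then-len passes (objective: simpler).
def EP (palavra : String) (classe : String) (train_tuple : List (String × String)) : Int × Int :=
  let classes_list := train_tuple.foldl (fun acc par => if par.2 == classe then acc ++ [par] else acc) []
  let count_classe : Int := classes_list.length
  let palavra_classe := classes_list.foldl (fun acc par => if par.1 == palavra then acc ++ [par.1] else acc) ([] : List String)
  ((palavra_classe.length : Int), count_classe)

-- ===== PORT B =====
def EP_alt (palavra : String) (classe : String) (train_tuple : List (String × String)) : Int × Int :=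
  train_tuple.foldl (fun (c : Int × Int) par =>
    if par.2 == classe then
      (if par.1 == palavra then (c.1 + 1, c.2 + 1) else (c.1, c.2 + 1))
    else c) (0, 0)

-- ===== PRECONDITION & SPEC =====
def Spec_EP (palavra : String) (classe : String) (train_tuple : List (String × String)) (out : Int × Int) : Prop := out = EP_alt palavra classe train_tuple
instance (palavra : String) (classe : String) (train_tuple : List (String × String)) (out : Int × Int) : Decidable (Spec_EP palavra classe train_tuple out) := by unfold Spec_EP; infer_instance

-- ===== CLAIM (what is proved, stated in full; the proofs are below) =====
def Claim_equal_EP : Prop := ∀ (palavra : String) (classe : String) (train_tuple : List (String × String)), Dom_EP palavra classe train_tuple → Spec_EP palavra classe train_tuple (EP palavra classe train_tuple)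

-- ===== LEMMAS AND PROOFS =====

-- ===== VERDICT (by name: the statement is the Claim_ definition above) =====

-- A's filter-into-list loops, characterised as append of a filtered map.
theorem foldl_filter_append {α β : Type} (p : α → Bool) (g : α → β) :
    ∀ (l : List α) (acc : List β),
      l.foldl (fun acc par => if p par then acc ++ [g par] else acc) acc
        = acc ++ (l.filter p).map g := by
  intro l
  induction l with
  | nil => intro acc; simp
  | cons h t ih =>
      intro acc
      by_cases hp : p h = true <;> simp [List.foldl, hp, ih]

-- B's single counting pass, characterised via countP.
theorem foldl_count (palavra classe : String) :
    ∀ (l : List (String × String)) (a b : Int),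
      l.foldl (fun (c : Int × Int) par =>
        if par.2 == classe then
          (if par.1 == palavra then (c.1 + 1, c.2 + 1) else (c.1, c.2 + 1))
        else c) (a, b)
        = (a + (l.countP (fun par => par.2 == classe && par.1 == palavra) : Int),
           b + (l.countP (fun par => par.2 == classe) : Int)) := by
  intro l
  induction l with
  | nil => intro a b; simp
  | cons h t ih =>
      intro a b
      rw [List.foldl_cons]
      by_cases hc : (h.2 == classe) = true
      · by_cases hw : (h.1 == palavra) = true
        · rw [if_pos hc, if_pos hw, ih]
          simp [hc, hw, Prod.ext_iff]
          constructor <;> ring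
        · rw [if_pos hc, if_neg hw, ih]
          simp [hc, hw, Prod.ext_iff]
          ring
      · rw [if_neg hc, ih]
        simp [hc]

theorem EP_spec : Claim_equal_EP := by
  intro palavra classe tt _
  unfold Spec_EP EP EP_alt
  simp only [foldl_count, foldl_filter_append]
  simp [List.countP_eq_length_filter, List.filter_filter, Bool.and_comm]
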